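-- pv_equiv track=rewrite | github.com/emirisuu/Programming | Python/neighbour/artimiausias_kaimynas.py | arciausias
-- ===== SOURCE A (Python) =====
-- import math
--
-- def arciausias(atstumai, startinis):
--     tasku_skaicius = len(atstumai)
--     aplankyti_taskai = [False] * tasku_skaicius
--     kelias = []
--     is_viso_atstumas = 0
--
--     # pradeti pirmame taske
--     dabartinis_taskas = startinis
--     kelias.append(dabartinis_taskas)
--     aplankyti_taskai[dabartinis_taskas] = True
--
--
--     # kartoti kol apkeliaujiami visi taskai
--     while len(kelias) < tasku_skaicius:
--         arciausias_taskas = None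
--         arciausias_atstumas = math.inf
--
--         # surasti artimiausia neaplankyta taska
--         for taskas in range(tasku_skaicius):
--             if not aplankyti_taskai[taskas]:
--                 atstumas = atstumai[dabartinis_taskas][taskas]
--                 if atstumas < arciausias_atstumas:
--                     arciausias_taskas = taskas
--                     arciausias_atstumas = atstumas
--
--         # pereiti i arciausia taska
--         dabartinis_taskas = arciausias_taskas
--         kelias.append(dabartinis_taskas)
--         aplankyti_taskai[dabartinis_taskas] = True
--         is_viso_atstumas += arciausias_atstumas
--
--     # Pabaigti visa marsruta griztant i pradini taska
--     kelias.append(startinis)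
--     is_viso_atstumas += atstumai[dabartinis_taskas][0]
--
--     return kelias, is_viso_atstumas
-- ===== SOURCE B (Python) =====
-- def arciausias(atstumai, startinis):
--     n = len(atstumai)
--     # precompute, per point, all points in ascending distance order (stable: ties -> lower index)
--     order = [sorted(range(n), key=row.__getitem__) for row in atstumai]
--     aplankyti = [False] * n
--     aplankyti[startinis] = True
--     kelias = [startinis]
--     is_viso_atstumas = 0
--     dabartinis = startinis
--     for _ in range(n - 1):
--         nxt = next(j for j in order[dabartinis] if not aplankyti[j])
--         aplankyti[nxt] = True
--         kelias.append(nxt)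
--         is_viso_atstumas += atstumai[dabartinis][nxt]
--         dabartinis = nxt
--     kelias.append(startinis)
--     is_viso_atstumas += atstumai[dabartinis][0]
--     return kelias, is_viso_atstumas
-- ===== Notes on version B (the rewrite author's own statement) =====
-- stated objective: alternative
-- what changed: B precomputes, for every point, the list of all points stably sorted ascending by that row's distances (ties break to the lower index) and the greedy walk then just takes the first not-yet-visited entry of the current point's sorted list, replacing A's per-step minimum scan with a math.inf sentinel; the final leg adding atstumai[last][0] is kept.
-- outside the precondition, e.g. on arciausias([[0, 1], [3]], 0): A returns ([0, 1, 0], 4), B raises IndexError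
import Mathlib
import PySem

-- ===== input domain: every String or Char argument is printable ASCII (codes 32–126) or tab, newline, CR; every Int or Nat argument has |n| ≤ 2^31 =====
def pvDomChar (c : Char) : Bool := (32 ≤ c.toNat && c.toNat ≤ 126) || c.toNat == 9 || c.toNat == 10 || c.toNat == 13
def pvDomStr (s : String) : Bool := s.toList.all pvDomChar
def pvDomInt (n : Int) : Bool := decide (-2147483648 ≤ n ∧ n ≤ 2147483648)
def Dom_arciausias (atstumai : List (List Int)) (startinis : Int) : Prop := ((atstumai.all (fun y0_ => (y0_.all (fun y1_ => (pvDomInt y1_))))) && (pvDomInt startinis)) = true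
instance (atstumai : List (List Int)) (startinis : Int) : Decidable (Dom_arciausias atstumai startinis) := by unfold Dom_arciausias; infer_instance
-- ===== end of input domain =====

-- B precomputes, per point, its neighbours sorted ascending by distance (stable, ties to
-- lower index) and the greedy walk takes the first unvisited entry of the current point's
-- sorted list, replacing A's per-step minimum scan with a math.inf sentinel; same results,
-- different data structure. Return-value equivalence; neither version mutates its arguments.

-- ===== PORT A =====
-- inner for-loop over range(tasku_skaicius): (arciausias_taskas, arciausias_atstumas);
-- (none, none) is Python's (None, math.inf) initial state
def arciausiasScan (atstumai : List (List Int)) (visited : List Bool) (n cur : Int) :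
    Option Int × Option Int :=
  (PySem.List.pyRange 0 n 1).foldl
    (fun st taskas =>
      if !(PySem.List.pyGetD visited taskas false) then
        let atstumas := PySem.List.pyGetD (PySem.List.pyGetD atstumai cur []) taskas 0
        if (match st.2 with | none => true | some bd => decide (atstumas < bd)) then
          (some taskas, some atstumas)
        else st
      else st)
    (none, none)

-- the while-loop; fuel = number of points bounds the iterations (kelias grows each round).
-- Python's arciausias_taskas is None only when every point is visited, which the while
-- condition rules out, so the `.getD 0` defaults are never the None case under Pre_.
def arciausiasGo (atstumai : List (List Int)) (n : Int) :
    Nat → List Bool → List Int → Int → Int → List Int × Int × Int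
  | 0, _, kelias, total, cur => (kelias, total, cur)
  | fuel + 1, visited, kelias, total, cur =>
    if (kelias.length : Int) < n then
      let st := arciausiasScan atstumai visited n cur
      let nxt := st.1.getD 0
      let nd := st.2.getD 0
      arciausiasGo atstumai n fuel (PySem.List.pySetD visited nxt true)
        (kelias ++ [nxt]) (total + nd) nxt
    else (kelias, total, cur)

def arciausias (atstumai : List (List Int)) (startinis : Int) : List Int × Int :=
  let n : Int := atstumai.length
  let visited := PySem.List.pySetD (List.replicate atstumai.length false) startinis true
  let r := arciausiasGo atstumai n atstumai.length visited [startinis] 0 startinis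
  (r.1 ++ [startinis],
   r.2.1 + PySem.List.pyGetD (PySem.List.pyGetD atstumai r.2.2 []) 0 0)

-- ===== PORT B =====
-- loop body of 'for _ in range(n - 1)'; state (aplankyti, kelias, is_viso_atstumas, dabartinis).
-- Python's next(...) always finds an unvisited point under Pre_, so `.getD 0` is never the
-- None case there.
def arciausiasAltStep (atstumai order : List (List Int))
    (st : List Bool × List Int × Int × Int) : List Bool × List Int × Int × Int :=
  let nxt := ((PySem.List.pyGetD order st.2.2.2 []).find?
    (fun j => !(PySem.List.pyGetD st.1 j false))).getD 0
  (PySem.List.pySetD st.1 nxt true, st.2.1 ++ [nxt],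
   st.2.2.1 + PySem.List.pyGetD (PySem.List.pyGetD atstumai st.2.2.2 []) nxt 0, nxt)

def arciausias_alt (atstumai : List (List Int)) (startinis : Int) : List Int × Int :=
  let n : Int := atstumai.length
  -- order = [sorted(range(n), key=row.__getitem__) for row in atstumai]
  let order := atstumai.map (fun row =>
    PySem.List.sorted (PySem.List.pyRange 0 n 1) (fun j => PySem.List.pyGetD row j 0) false)
  let s := (PySem.List.pyRange 0 (n - 1) 1).foldl
    (fun st _ => arciausiasAltStep atstumai order st)
    (PySem.List.pySetD (List.replicate atstumai.length false) startinis true,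
     [startinis], 0, startinis)
  (s.2.1 ++ [startinis],
   s.2.2.1 + PySem.List.pyGetD (PySem.List.pyGetD atstumai s.2.2.2 []) 0 0)

-- ===== PRECONDITION & SPEC =====
-- Pre_ excludes exactly the inputs on which an exception is reached: the empty matrix and a
-- start index outside [-n, n) (A raises IndexError at aplankyti[startinis]), and matrices
-- with a row shorter than the point count (A raises IndexError scanning such a row on every
-- run except when only its wrap-back column 0 is read — there A returns while B's upfront
-- row sort raises, see the cite).
def Pre_arciausias (atstumai : List (List Int)) (startinis : Int) : Prop :=
  atstumai ≠ [] ∧ -(atstumai.length : Int) ≤ startinis ∧ startinis < atstumai.length ∧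
  ∀ row ∈ atstumai, atstumai.length ≤ row.length
instance (atstumai : List (List Int)) (startinis : Int) :
    Decidable (Pre_arciausias atstumai startinis) := by unfold Pre_arciausias; infer_instance

def pvWitness_arciausias : List (List Int) × Int := ([[0, 2, 1], [2, 0, 3], [1, 3, 0]], 0)

def Spec_arciausias (atstumai : List (List Int)) (startinis : Int) (out : List Int × Int) : Prop := out = arciausias_alt atstumai startinis
instance (atstumai : List (List Int)) (startinis : Int) (out : List Int × Int) : Decidable (Spec_arciausias atstumai startinis out) := by unfold Spec_arciausias; infer_instance

-- ===== CLAIM (what is proved, stated in full; the proofs are below) =====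
def Claim_equal_arciausias : Prop := ∀ (atstumai : List (List Int)) (startinis : Int), Dom_arciausias atstumai startinis → Pre_arciausias atstumai startinis → Spec_arciausias atstumai startinis (arciausias atstumai startinis)

-- ===== LEMMAS AND PROOFS =====

-- normalising a negative in-range Python index
theorem pv_pyIdx_norm (n : Nat) (i : Int) (h1 : -(n : Int) ≤ i) (h2 : i < 0) :
    PySem.List.pyIdx? n i = PySem.List.pyIdx? n (i + n) := by
  unfold PySem.List.pyIdx?
  rw [if_neg (by omega), if_pos h1, if_pos (by omega), if_pos (by omega)]
  congr 1
  omega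

theorem pv_getD_norm {α : Type} (xs : List α) (i : Int) (d : α)
    (h1 : -(xs.length : Int) ≤ i) (h2 : i < 0) :
    PySem.List.pyGetD xs i d = PySem.List.pyGetD xs (i + xs.length) d := by
  unfold PySem.List.pyGetD PySem.List.pyGet?
  rw [pv_pyIdx_norm xs.length i h1 h2]

theorem pv_setD_norm {α : Type} (xs : List α) (i : Int) (v : α)
    (h1 : -(xs.length : Int) ≤ i) (h2 : i < 0) :
    PySem.List.pySetD xs i v = PySem.List.pySetD xs (i + xs.length) v := by
  unfold PySem.List.pySetD PySem.List.pySet?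
  rw [pv_pyIdx_norm xs.length i h1 h2]

-- reading an updated cell, Int-index version of PySem.List.pyGetD_pySetD_natCast
theorem pv_getD_setD {α : Type} (xs : List α) (r j : Int) (v d : α)
    (h0 : 0 ≤ r) (hr : r < xs.length) (hj : 0 ≤ j) :
    PySem.List.pyGetD (PySem.List.pySetD xs r v) j d =
      if j = r then v else PySem.List.pyGetD xs j d := by
  have hr' : r = ((r.toNat : Nat) : Int) := (Int.toNat_of_nonneg h0).symm
  have hj' : j = ((j.toNat : Nat) : Int) := (Int.toNat_of_nonneg hj).symm
  rw [hr', hj', PySem.List.pyGetD_pySetD_natCast xs r.toNat j.toNat v d (by omega)]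
  congr 1
  simp only [Nat.cast_inj]

-- the first-wins minimum with tie-break to the lower index
def pvIsMin (k : Int → Int) (U : List Int) (r : Int) : Prop :=
  r ∈ U ∧ ∀ x ∈ U, k r < k x ∨ (k r = k x ∧ r ≤ x)

theorem pv_isMin_unique (k : Int → Int) (U : List Int) (r1 r2 : Int)
    (h1 : pvIsMin k U r1) (h2 : pvIsMin k U r2) : r1 = r2 := by
  have a := h1.2 r2 h2.1
  have b := h2.2 r1 h1.1
  omega

-- A's inner scan from a live candidate m computes the first-wins minimum of m :: U
theorem pv_scanA (k : Int → Int) :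
    ∀ (U : List Int) (m : Int), U.Pairwise (· < ·) → (∀ x ∈ U, m < x) →
    ∃ r, U.foldl (fun st j =>
        if (match st.2 with | none => true | some bd => decide (k j < bd))
          then ((some j : Option Int), (some (k j) : Option Int)) else st)
        (some m, some (k m)) = (some r, some (k r)) ∧ pvIsMin k (m :: U) r := by
  intro U
  induction U with
  | nil =>
    intro m _ _
    refine ⟨m, rfl, by simp, ?_⟩
    intro x hx
    have hx' : x = m := by simpa using hx
    subst hx'
    omega
  | cons x t ih =>
    intro m hp hlt
    have hmx : m < x := hlt x (by simp)
    have hxt : ∀ y ∈ t, x < y := (List.pairwise_cons.mp hp).1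
    have hpt : t.Pairwise (· < ·) := (List.pairwise_cons.mp hp).2
    simp only [List.foldl_cons]
    by_cases h : k x < k m
    · rw [if_pos (by simpa using h)]
      obtain ⟨r, hr, hm, hmin⟩ := ih x hpt hxt
      refine ⟨r, hr, List.mem_cons_of_mem m hm, ?_⟩
      intro y hy
      rcases List.mem_cons.mp hy with h' | h'
      · subst h'
        have hvx := hmin x (by simp)
        omega
      · exact hmin y h'
    · rw [if_neg (by simpa using h)]
      obtain ⟨r, hr, hm, hmin⟩ := ih m hpt (fun y hy => lt_trans hmx (hxt y hy))
      refine ⟨r, hr, ?_, ?_⟩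
      · rcases List.mem_cons.mp hm with h' | h'
        · simp [h']
        · exact List.mem_cons_of_mem m (List.mem_cons_of_mem x h')
      · intro y hy
        have hvm := hmin m (by simp)
        rcases List.mem_cons.mp hy with h' | h'
        · subst h'
          omega
        · rcases List.mem_cons.mp h' with h'' | h''
          · subst h''
            -- y = x: r is min of m :: t, ¬ k x < k m, and r = m or r ∈ t with all t > x
            rcases List.mem_cons.mp hm with hrm | hrt
            · subst hrm
              omega
            · have := hxt r hrt
              omega
          · exact hmin y (List.mem_cons_of_mem m h'')

-- A's inner scan from the (None, math.inf) start over a nonempty unvisited list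
theorem pv_scanA_top (k : Int → Int) (U : List Int) (hne : U ≠ [])
    (hp : U.Pairwise (· < ·)) :
    ∃ r, U.foldl (fun st j =>
        if (match st.2 with | none => true | some bd => decide (k j < bd))
          then ((some j : Option Int), (some (k j) : Option Int)) else st)
        (none, none) = (some r, some (k r)) ∧ pvIsMin k U r := by
  cases U with
  | nil => exact absurd rfl hne
  | cons x t =>
    simp only [List.foldl_cons]
    rw [if_pos trivial]
    exact pv_scanA k t x (List.pairwise_cons.mp hp).2 (List.pairwise_cons.mp hp).1

-- strict lexicographic order (key, then value) used for the stably sorted index lists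
theorem pv_insertBy_lex (k : Int → Int) (x : Int) :
    ∀ (acc : List Int),
      acc.Pairwise (fun a b => k a < k b ∨ (k a = k b ∧ a < b)) →
      (∀ a ∈ acc, a < x) →
      (PySem.List.insertBy (fun a b => decide (k a < k b)) x acc).Pairwise
        (fun a b => k a < k b ∨ (k a = k b ∧ a < b)) := by
  intro acc
  induction acc with
  | nil => intro _ _; simp [PySem.List.insertBy]
  | cons y ys ih =>
    intro hp hlt
    have hyys := List.pairwise_cons.mp hp
    unfold PySem.List.insertBy
    by_cases h : k x < k y
    · rw [if_pos (by simpa using h)]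
      refine List.pairwise_cons.mpr ⟨?_, hp⟩
      intro z hz
      rcases List.mem_cons.mp hz with h' | h'
      · subst h'; exact Or.inl h
      · have := hyys.1 z h'
        omega
    · rw [if_neg (by simpa using h)]
      refine List.pairwise_cons.mpr ⟨?_, ih hyys.2 (fun a ha => hlt a (by simp [ha]))⟩
      intro z hz
      rcases (PySem.List.mem_insertBy _ x z ys).mp hz with h' | h'
      · subst h'
        have := hlt y (by simp)
        omega
      · exact hyys.1 z h'

theorem pv_foldl_insert_lex (k : Int → Int) :
    ∀ (xs acc : List Int), xs.Pairwise (· < ·) →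
      acc.Pairwise (fun a b => k a < k b ∨ (k a = k b ∧ a < b)) →
      (∀ a ∈ acc, ∀ b ∈ xs, a < b) →
      (xs.foldl (fun acc x => PySem.List.insertBy (fun a b => decide (k a < k b)) x acc)
        acc).Pairwise (fun a b => k a < k b ∨ (k a = k b ∧ a < b)) := by
  intro xs
  induction xs with
  | nil => intro acc _ hacc _; exact hacc
  | cons x t ih =>
    intro acc hp hacc hcross
    simp only [List.foldl_cons]
    have hxt := List.pairwise_cons.mp hp
    refine ih _ hxt.2 ?_ ?_
    · exact pv_insertBy_lex k x acc hacc (fun a ha => hcross a ha x (by simp))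
    · intro a ha b hb
      rcases (PySem.List.mem_insertBy _ x a acc).mp ha with h' | h'
      · subst h'; exact hxt.1 b hb
      · exact hcross a h' b (by simp [hb])

-- sorted(range-like list, key) is pairwise strictly increasing in (key, value)
theorem pv_sorted_lex (k : Int → Int) (xs : List Int) (hp : xs.Pairwise (· < ·)) :
    (PySem.List.sorted xs k false).Pairwise
      (fun a b => k a < k b ∨ (k a = k b ∧ a < b)) := by
  rw [PySem.List.sorted_eq_foldl_insertBy]
  exact pv_foldl_insert_lex k xs [] hp (by simp) (by simp)

-- find? on a lex-sorted list returns the first-wins minimum among the matches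
theorem pv_findB (k : Int → Int) (p : Int → Bool) :
    ∀ (ys : List Int),
      ys.Pairwise (fun a b => k a < k b ∨ (k a = k b ∧ a < b)) →
      ∀ r, ys.find? p = some r →
        r ∈ ys ∧ p r = true ∧
          ∀ x ∈ ys, p x = true → k r < k x ∨ (k r = k x ∧ r ≤ x) := by
  intro ys
  induction ys with
  | nil => intro _ r h; simp at h
  | cons y t ih =>
    intro hp r hr
    have hyt := List.pairwise_cons.mp hp
    by_cases h : p y = true
    · rw [List.find?_cons_of_pos h] at hr
      injection hr with hr; subst hr
      refine ⟨by simp, h, ?_⟩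
      intro x hx _
      rcases List.mem_cons.mp hx with h' | h'
      · subst h'; omega
      · have := hyt.1 x h'
        omega
    · rw [List.find?_cons_of_neg (by simpa using h)] at hr
      obtain ⟨hm, hpr, hmin⟩ := ih hyt.2 r hr
      refine ⟨by simp [hm], hpr, ?_⟩
      intro x hx hpx
      rcases List.mem_cons.mp hx with h' | h'
      · subst h'; exact absurd hpx h
      · exact hmin x h' hpx

-- one loop round: A's scan and B's walk down the sorted neighbour list pick the same point
theorem pv_step_eq (atstumai order : List (List Int)) (visited : List Bool) (cur : Int)
    (horder : order = atstumai.map (fun row =>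
      PySem.List.sorted (PySem.List.pyRange 0 (atstumai.length : Int) 1)
        (fun j => PySem.List.pyGetD row j 0) false))
    (hc0 : -(atstumai.length : Int) ≤ cur) (hcn : cur < atstumai.length)
    (hne : (PySem.List.pyRange 0 (atstumai.length : Int) 1).filter
      (fun j => !(PySem.List.pyGetD visited j false)) ≠ []) :
    ∃ r, r ∈ (PySem.List.pyRange 0 (atstumai.length : Int) 1).filter
        (fun j => !(PySem.List.pyGetD visited j false)) ∧
      arciausiasScan atstumai visited (atstumai.length : Int) cur =
        (some r, some (PySem.List.pyGetD (PySem.List.pyGetD atstumai cur []) r 0)) ∧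
      ((PySem.List.pyGetD order cur []).find?
        (fun j => !(PySem.List.pyGetD visited j false))).getD 0 = r := by
  set n := atstumai.length with hn
  set U := (PySem.List.pyRange 0 (n : Int) 1).filter
    (fun j => !(PySem.List.pyGetD visited j false)) with hU
  set row := PySem.List.pyGetD atstumai cur [] with hrow
  set k : Int → Int := fun j => PySem.List.pyGetD row j 0 with hk
  -- the normalised current index
  have hcur : ∃ c : Int, 0 ≤ c ∧ c < n ∧
      PySem.List.pyGetD atstumai cur [] = PySem.List.pyGetD atstumai c [] ∧
      PySem.List.pyGetD order cur [] = PySem.List.pyGetD order c [] := by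
    by_cases hneg : cur < 0
    · refine ⟨cur + n, by omega, by omega, pv_getD_norm atstumai cur [] (by omega) hneg, ?_⟩
      have hlen : order.length = n := by simp [horder, hn]
      rw [pv_getD_norm order cur [] (by rw [hlen]; omega) hneg, hlen]
    · exact ⟨cur, by omega, hcn, rfl, rfl⟩
  obtain ⟨c, hc0', hcn', hrowc, hordc⟩ := hcur
  -- B's list at the current point is sorted(range(n), key = row[·])
  have hordsorted : PySem.List.pyGetD order cur [] =
      PySem.List.sorted (PySem.List.pyRange 0 (n : Int) 1) k false := by
    rw [hordc, horder]
    have hclt : c.toNat < atstumai.length := by omega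
    rw [PySem.List.pyGetD_eq_getElem _ _ hc0' (by simpa [hn] using hcn')]
    rw [List.getElem_map]
    have : atstumai[c.toNat] = PySem.List.pyGetD atstumai c [] :=
      (PySem.List.pyGetD_eq_getElem atstumai [] hc0' (by simpa [hn] using hcn')).symm
    rw [this, ← hrowc]
  have hpU : U.Pairwise (· < ·) := by
    rw [hU]; exact (PySem.List.pairwise_lt_pyRange_one 0 _).filter _
  -- A's scan = the first-wins minimum of U
  obtain ⟨r, hrfold, hrmin⟩ := pv_scanA_top k U hne hpU
  have hscan : arciausiasScan atstumai visited (n : Int) cur = (some r, some (k r)) := by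
    unfold arciausiasScan
    rw [← List.foldl_filter, ← hU, ← hrow]
    exact hrfold
  -- B's find? over the sorted list returns the same point
  have hfind : ((PySem.List.pyGetD order cur []).find?
      (fun j => !(PySem.List.pyGetD visited j false))).getD 0 = r := by
    rw [hordsorted]
    set ys := PySem.List.sorted (PySem.List.pyRange 0 (n : Int) 1) k false with hys
    set p : Int → Bool := fun j => !(PySem.List.pyGetD visited j false) with hpdef
    have hlex := pv_sorted_lex k (PySem.List.pyRange 0 (n : Int) 1)
      (PySem.List.pairwise_lt_pyRange_one 0 _)
    have hsome : (ys.find? p).isSome = true := by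
      rw [List.find?_isSome]
      have hrU := hrmin.1
      rw [hU, List.mem_filter] at hrU
      exact ⟨r, by rw [hys, PySem.List.mem_sorted]; exact hrU.1, hrU.2⟩
    obtain ⟨r2, hr2⟩ := Option.isSome_iff_exists.mp hsome
    obtain ⟨hr2mem, hr2p, hr2min⟩ := pv_findB k p ys hlex r2 hr2
    have hr2U : r2 ∈ U := by
      rw [hU, List.mem_filter]
      exact ⟨by rw [hys, PySem.List.mem_sorted] at hr2mem; exact hr2mem, hr2p⟩
    have : r2 = r := by
      refine pv_isMin_unique k U r2 r ⟨hr2U, ?_⟩ hrmin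
      intro x hx
      have hxmem : x ∈ ys := by
        rw [hys, PySem.List.mem_sorted]
        exact (List.mem_filter.mp (hU ▸ hx)).1
      exact hr2min x hxmem (List.mem_filter.mp (hU ▸ hx)).2
    rw [hr2, this, Option.getD_some]
  exact ⟨r, hrmin.1, hscan, hfind⟩

-- the loops run in lockstep: A's while-with-fuel vs B's for over range(n-1)
theorem pv_go_eq (atstumai order : List (List Int))
    (horder : order = atstumai.map (fun row =>
      PySem.List.sorted (PySem.List.pyRange 0 (atstumai.length : Int) 1)
        (fun j => PySem.List.pyGetD row j 0) false)) :
    ∀ (m : Nat) (visited : List Bool) (kelias : List Int) (total cur : Int),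
      visited.length = atstumai.length →
      kelias.length + m = atstumai.length →
      ((PySem.List.pyRange 0 (atstumai.length : Int) 1).filter
        (fun j => !(PySem.List.pyGetD visited j false))).length = m →
      -(atstumai.length : Int) ≤ cur → cur < atstumai.length →
      arciausiasGo atstumai (atstumai.length : Int) (m + 1) visited kelias total cur =
        (let s := (fun st => arciausiasAltStep atstumai order st)^[m]
          (visited, kelias, total, cur);
         (s.2.1, s.2.2.1, s.2.2.2)) := by
  intro m
  induction m with
  | zero =>
    intro visited kelias total cur hv hlen hfil hc0 hcn
    rw [arciausiasGo, if_neg (by omega)]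
    rfl
  | succ m ih =>
    intro visited kelias total cur hv hlen hfil hc0 hcn
    have hne : (PySem.List.pyRange 0 (atstumai.length : Int) 1).filter
        (fun j => !(PySem.List.pyGetD visited j false)) ≠ [] := by
      intro h
      rw [h] at hfil
      simp at hfil
    obtain ⟨r, hrU, hscan, hfind⟩ :=
      pv_step_eq atstumai order visited cur horder hc0 hcn hne
    obtain ⟨hrmem, hrp⟩ := List.mem_filter.mp hrU
    obtain ⟨hr0, hrn⟩ := PySem.List.mem_pyRange_one.mp hrmem
    rw [arciausiasGo, if_pos (by omega)]
    simp only [hscan, Option.getD_some]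
    rw [Function.iterate_succ_apply]
    have hstep : arciausiasAltStep atstumai order (visited, kelias, total, cur) =
        (PySem.List.pySetD visited r true, kelias ++ [r],
         total + PySem.List.pyGetD (PySem.List.pyGetD atstumai cur []) r 0, r) := by
      unfold arciausiasAltStep
      rw [hfind]
    rw [hstep]
    -- re-establish the invariants and recurse
    apply ih
    · simp [hv]
    · simp only [List.length_append, List.length_cons, List.length_nil]
      omega
    · have hnodup : ((PySem.List.pyRange 0 (atstumai.length : Int) 1).filter
          (fun j => !(PySem.List.pyGetD visited j false))).Nodup :=
        (PySem.List.nodup_pyRange_one 0 _).filter _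
      have hfilter : (PySem.List.pyRange 0 (atstumai.length : Int) 1).filter
          (fun j => !(PySem.List.pyGetD (PySem.List.pySetD visited r true) j false)) =
          ((PySem.List.pyRange 0 (atstumai.length : Int) 1).filter
            (fun j => !(PySem.List.pyGetD visited j false))).erase r := by
        rw [hnodup.erase_eq_filter r, List.filter_filter]
        apply List.filter_congr
        intro j hj
        obtain ⟨hj1, hj2⟩ := PySem.List.mem_pyRange_one.mp hj
        rw [pv_getD_setD visited r j true false hr0 (by omega) hj1]
        by_cases h : j = r <;> simp [h]
      rw [hfilter, List.length_erase_of_mem hrU, hfil]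
      omega
    · omega
    · omega

-- ===== VERDICT (by name: the statement is the Claim_ definition above) =====
theorem arciausias_spec : Claim_equal_arciausias := by
  intro atstumai startinis _ hpre
  obtain ⟨hne, hs0, hsn, _⟩ := hpre
  have hn1 : 1 ≤ atstumai.length := List.length_pos_of_ne_nil hne
  -- the normalised start index
  have hstart : ∃ c : Int, 0 ≤ c ∧ c < atstumai.length ∧
      PySem.List.pySetD (List.replicate atstumai.length false) startinis true =
        PySem.List.pySetD (List.replicate atstumai.length false) c true := by
    by_cases hneg : startinis < 0
    · refine ⟨startinis + atstumai.length, by omega, by omega, ?_⟩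
      rw [pv_setD_norm _ startinis true (by simpa using hs0) hneg]
      simp
    · exact ⟨startinis, by omega, hsn, rfl⟩
  obtain ⟨c, hc0, hcn, hvis⟩ := hstart
  set visited0 := PySem.List.pySetD (List.replicate atstumai.length false) startinis true
    with hvis0
  have hvlen : visited0.length = atstumai.length := by
    simp [hvis0, PySem.List.length_pySetD]
  have hfil0 : ((PySem.List.pyRange 0 (atstumai.length : Int) 1).filter
      (fun j => !(PySem.List.pyGetD visited0 j false))).length = atstumai.length - 1 := by
    have hrepl : (List.replicate atstumai.length false).length = atstumai.length := by simp
    have hfilter : (PySem.List.pyRange 0 (atstumai.length : Int) 1).filter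
        (fun j => !(PySem.List.pyGetD visited0 j false)) =
        (PySem.List.pyRange 0 (atstumai.length : Int) 1).erase c := by
      rw [(PySem.List.nodup_pyRange_one 0 _).erase_eq_filter c]
      apply List.filter_congr
      intro j hj
      obtain ⟨hj1, hj2⟩ := PySem.List.mem_pyRange_one.mp hj
      rw [hvis, pv_getD_setD _ c j true false hc0 (by rw [hrepl]; omega) hj1]
      by_cases h : j = c
      · simp [h]
      · rw [PySem.List.pyGetD_eq_getElem (xs := List.replicate atstumai.length false)
          (i := j) (d := false) hj1 (by rw [hrepl]; omega)]
        simp [h]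
    rw [hfilter, List.length_erase_of_mem
      (PySem.List.mem_pyRange_one.mpr ⟨hc0, by omega⟩),
      PySem.List.length_pyRange_one]
    omega
  have hiter : ∀ {α : Type} (f : α → α) (l : List Int) (s : α),
      l.foldl (fun a _ => f a) s = f^[l.length] s := by
    intro α f l
    induction l with
    | nil => intro s; rfl
    | cons x t iht =>
      intro s
      rw [List.foldl_cons, iht, List.length_cons, Function.iterate_succ_apply]
  have hgo := pv_go_eq atstumai _ rfl (atstumai.length - 1) visited0 [startinis] 0 startinis
    hvlen (by simp; omega) hfil0 (by simpa using hs0) hsn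
  rw [show atstumai.length - 1 + 1 = atstumai.length from by omega] at hgo
  unfold Spec_arciausias arciausias arciausias_alt
  simp only
  rw [hiter, PySem.List.length_pyRange_one,
    show ((atstumai.length : Int) - 1 - 0).toNat = atstumai.length - 1 from by omega, hgo]
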